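-- pv_equiv track=rewrite | github.com/ravish-oo/opoch-toe-arc-agi-v3 | arc/op/truth.py | _kmp_min_period
-- ===== SOURCE A (Python) =====
-- def _kmp_min_period(s: list[int]) -> int | None:
--     """
--     Compute minimal period of sequence using KMP failure function.
--
--     Contract:
--     - Returns smallest p such that s[i] = s[i+p] for all valid i
--     - Returns None if s is aperiodic (period = len(s))
--
--     Algorithm (KMP):
--     - Failure function f[i] = longest proper prefix of s[0..i] that is also suffix
--     - Minimal period = n - f[n-1] if it divides n, else None
--     """
--     n = len(s)
--     if n == 0:
--         return None
--
--     # Build KMP failure function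
--     f = [0] * n
--     k = 0
--     for i in range(1, n):
--         while k > 0 and s[k] != s[i]:
--             k = f[k - 1]
--         if s[k] == s[i]:
--             k += 1
--         f[i] = k
--
--     # Minimal period = n - f[n-1]
--     period = n - f[n - 1]
--
--     # Verify period divides n (exact periodicity)
--     if n % period == 0 and period < n:
--         return period
--     return None
-- ===== SOURCE B (Python) =====
-- def _kmp_min_period(s: list[int]) -> int | None:
--     """Minimal period via direct search: the smallest shift p whose overlap
--     matches is the minimal period; accept it only if it divides n exactly."""
--     n = len(s)
--     for p in range(1, n):
--         if s[p:] == s[:n - p]: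
--             return p if n % p == 0 else None
--     return None
-- ===== Notes on version B (the rewrite author's own statement) =====
-- stated objective: simpler
-- what changed: Replaces A's KMP failure-function construction (auxiliary array plus nested repair loop) with a direct search for the smallest shift p whose overlap slices match, followed by the same divisibility test.
import Mathlib
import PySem

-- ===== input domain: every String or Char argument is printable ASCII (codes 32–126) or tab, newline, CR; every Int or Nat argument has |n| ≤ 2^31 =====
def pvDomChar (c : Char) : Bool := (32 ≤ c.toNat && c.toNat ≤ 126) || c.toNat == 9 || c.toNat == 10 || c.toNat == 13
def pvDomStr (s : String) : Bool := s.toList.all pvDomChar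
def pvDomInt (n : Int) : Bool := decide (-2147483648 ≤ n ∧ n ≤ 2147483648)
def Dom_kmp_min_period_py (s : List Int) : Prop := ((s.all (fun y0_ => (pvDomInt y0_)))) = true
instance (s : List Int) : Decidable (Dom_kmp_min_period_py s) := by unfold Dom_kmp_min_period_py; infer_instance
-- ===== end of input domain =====

-- B replaces A's KMP failure-function construction by a direct search for the smallest
-- matching shift (checked with slice comparisons) followed by the same divisibility test;
-- objective: simpler (no auxiliary array, no nested repair loop).

-- ===== PORT A =====
-- inner 'while k > 0 and s[k] != s[i]: k = f[k-1]' loop; the extra fuel argument only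
-- bounds the iteration count (each step strictly decreases k, so fuel = initial k suffices)
def kmpInner (s : List Int) (f : List Nat) (x : Int) : Nat → Nat → Nat
  | 0, k => k
  | fuel + 1, k => if 0 < k ∧ s.getD k 0 ≠ x then kmpInner s f x fuel (f.getD (k - 1) 0) else k

-- one iteration of 'for i in range(1, n)': repair k, extend on match, store f[i] = k
def kmpStep (s : List Int) (st : List Nat × Nat) (i : Nat) : List Nat × Nat :=
  let k1 := kmpInner s st.1 (s.getD i 0) st.2 st.2
  let k2 := if s.getD k1 0 = s.getD i 0 then k1 + 1 else k1
  (st.1.set i k2, k2)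

def kmp_min_period_py (s : List Int) : Option Int :=
  if s.length = 0 then none
  else
    if s.length % (s.length - ((List.range' 1 (s.length - 1)).foldl (kmpStep s)
          (List.replicate s.length 0, 0)).1.getD (s.length - 1) 0) = 0 ∧
        (s.length - ((List.range' 1 (s.length - 1)).foldl (kmpStep s)
          (List.replicate s.length 0, 0)).1.getD (s.length - 1) 0) < s.length then
      some ((s.length - ((List.range' 1 (s.length - 1)).foldl (kmpStep s)
          (List.replicate s.length 0, 0)).1.getD (s.length - 1) 0 : Nat) : Int)
    else none

-- ===== PORT B =====
def kmp_min_period_py_alt (s : List Int) : Option Int :=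
  match (List.range' 1 (s.length - 1)).find? (fun p => s.drop p == s.take (s.length - p)) with
  | some p => if s.length % p = 0 then some (p : Int) else none
  | none => none

-- ===== PRECONDITION & SPEC =====
def Spec_kmp_min_period_py (s : List Int) (out : Option Int) : Prop := out = kmp_min_period_py_alt s
instance (s : List Int) (out : Option Int) : Decidable (Spec_kmp_min_period_py s out) := by unfold Spec_kmp_min_period_py; infer_instance

-- ===== CLAIM (what is proved, stated in full; the proofs are below) =====
def Claim_equal_kmp_min_period_py : Prop := ∀ (s : List Int), Dom_kmp_min_period_py s → Spec_kmp_min_period_py s (kmp_min_period_py s)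

-- ===== LEMMAS AND PROOFS =====

-- 'k is a border of the length-m prefix of s' (pointwise, via getD; used with k ≤ m)
def Bord (s : List Int) (m k : Nat) : Prop := ∀ j, j < k → s.getD j 0 = s.getD (m - k + j) 0

def bordB (s : List Int) (m k : Nat) : Bool :=
  (List.range k).all (fun j => s.getD j 0 == s.getD (m - k + j) 0)

theorem bordB_iff (s : List Int) (m k : Nat) : bordB s m k = true ↔ Bord s m k := by
  simp [bordB, Bord, List.all_eq_true, List.mem_range]

-- length of the longest proper border of the length-m prefix (for 1 ≤ m)
def mu (s : List Int) (m : Nat) : Nat := Nat.findGreatest (fun k => bordB s m k = true) (m - 1)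

theorem mu_le (s : List Int) (m : Nat) : mu s m ≤ m - 1 := Nat.findGreatest_le _

theorem mu_bord (s : List Int) (m : Nat) : Bord s m (mu s m) := by
  rcases Nat.eq_zero_or_pos (mu s m) with h | h
  · intro j hj; omega
  · have h0 : bordB s m 0 = true := by simp [bordB]
    rw [← bordB_iff]
    exact Nat.findGreatest_spec (P := fun k => bordB s m k = true) (Nat.zero_le _) h0

theorem mu_max (s : List Int) (m k : Nat) (hk : k ≤ m - 1) (hb : Bord s m k) : k ≤ mu s m :=
  Nat.le_findGreatest hk ((bordB_iff s m k).2 hb)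

-- F2: extending a border by one matching element
theorem bord_succ (s : List Int) (i k : Nat) (hk : k ≤ i) :
    Bord s (i + 1) (k + 1) ↔ (Bord s i k ∧ s.getD k 0 = s.getD i 0) := by
  constructor
  · intro h
    refine ⟨fun j hj => ?_, ?_⟩
    · have := h j (by omega)
      have e : i + 1 - (k + 1) + j = i - k + j := by omega
      rwa [e] at this
    · have := h k (by omega)
      have e : i + 1 - (k + 1) + k = i := by omega
      rwa [e] at this
  · rintro ⟨h1, h2⟩ j hj
    have e : i + 1 - (k + 1) + j = i - k + j := by omega
    rw [e]
    rcases Nat.lt_or_ge j k with hj' | hj'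
    · exact h1 j hj'
    · have : j = k := by omega
      subst this
      have e2 : i - j + j = i := by omega
      rw [e2]; exact h2

-- F5: a border of a border is a border
theorem bord_trans (s : List Int) (m k k' : Nat) (h1 : k' ≤ k) (h2 : k ≤ m)
    (hb' : Bord s k k') (hb : Bord s m k) : Bord s m k' := by
  intro j hj
  have e1 := hb' j hj
  have e2 := hb (k - k' + j) (by omega)
  have e : m - k + (k - k' + j) = m - k' + j := by omega
  rw [e] at e2
  rw [e1, ← e2]

-- F4: of two borders the smaller is a border of the larger
theorem bord_nest (s : List Int) (m k k' : Nat) (h1 : k' < k) (h2 : k ≤ m)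
    (hb' : Bord s m k') (hb : Bord s m k) : Bord s k k' := by
  intro j hj
  have e1 := hb' j hj
  have e2 := hb (k - k' + j) (by omega)
  have e : m - k + (k - k' + j) = m - k' + j := by omega
  rw [e] at e2
  rw [e1, e2]

-- loop invariant of the inner repair loop
def GoodK (s : List Int) (i k : Nat) : Prop :=
  Bord s i k ∧ k < i ∧ ∀ u, k < u → u < i → Bord s i u → s.getD u 0 ≠ s.getD i 0

theorem inner_spec (s : List Int) (f : List Nat) (i : Nat)
    (hf : ∀ j, j < i → f.getD j 0 = mu s (j + 1)) :
    ∀ k fuel, k ≤ fuel → GoodK s i k →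
      GoodK s i (kmpInner s f (s.getD i 0) fuel k) ∧
      (kmpInner s f (s.getD i 0) fuel k = 0 ∨
        s.getD (kmpInner s f (s.getD i 0) fuel k) 0 = s.getD i 0) := by
  intro k
  induction k using Nat.strong_induction_on with
  | _ k ih =>
    intro fuel hfuel hg
    cases fuel with
    | zero =>
      have hk0 : k = 0 := by omega
      subst hk0
      exact ⟨hg, Or.inl rfl⟩
    | succ fuel =>
      by_cases hc : 0 < k ∧ s.getD k 0 ≠ s.getD i 0
      · rw [show kmpInner s f (s.getD i 0) (fuel + 1) k
              = kmpInner s f (s.getD i 0) fuel (f.getD (k - 1) 0) from by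
            simp only [kmpInner]; rw [if_pos hc]]
        have hki : k < i := hg.2.1
        have hfk : f.getD (k - 1) 0 = mu s k := by
          have := hf (k - 1) (by omega)
          rwa [show k - 1 + 1 = k from by omega] at this
        rw [hfk]
        have hmuk : mu s k ≤ k - 1 := mu_le s k
        apply ih (mu s k) (by omega) fuel (by omega)
        refine ⟨?_, by omega, ?_⟩
        · exact bord_trans s i k (mu s k) (by omega) (by omega) (mu_bord s k) hg.1
        · intro u hu1 hu2 hbu
          rcases Nat.lt_or_ge u k with hlt | hge
          · -- u is a border of the length-k prefix, contradicting maximality of mu s k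
            have : Bord s k u := bord_nest s i k u hlt (by omega) hbu hg.1
            have : u ≤ mu s k := mu_max s k u (by omega) this
            omega
          · rcases Nat.eq_or_lt_of_le hge with he | hlt
            · subst he; exact hc.2
            · exact hg.2.2 u hlt hu2 hbu
      · rw [show kmpInner s f (s.getD i 0) (fuel + 1) k = k from by
            simp only [kmpInner]; rw [if_neg hc]]
        refine ⟨hg, ?_⟩
        by_cases h0 : k = 0
        · exact Or.inl h0
        · right
          by_contra hne
          exact hc ⟨by omega, hne⟩

-- the stored value f[i] is the longest proper border of the length-(i+1) prefix
theorem step_mu (s : List Int) (i r : Nat) (hg : GoodK s i r)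
    (hr : r = 0 ∨ s.getD r 0 = s.getD i 0) :
    (if s.getD r 0 = s.getD i 0 then r + 1 else r) = mu s (i + 1) := by
  have hri : r < i := hg.2.1
  by_cases hm : s.getD r 0 = s.getD i 0
  · rw [if_pos hm]
    have hb : Bord s (i + 1) (r + 1) := (bord_succ s i r (by omega)).2 ⟨hg.1, hm⟩
    have hle : r + 1 ≤ mu s (i + 1) := mu_max s (i + 1) (r + 1) (by omega) hb
    have hge : mu s (i + 1) ≤ r + 1 := by
      by_contra hgt
      have hmu_le : mu s (i + 1) ≤ i := by have := mu_le s (i + 1); omega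
      have hbmu : Bord s (i + 1) (mu s (i + 1)) := mu_bord s (i + 1)
      obtain ⟨u, hu⟩ : ∃ u, mu s (i + 1) = u + 1 := ⟨mu s (i + 1) - 1, by omega⟩
      rw [hu] at hbmu
      have := (bord_succ s i u (by omega)).1 hbmu
      exact hg.2.2 u (by omega) (by omega) this.1 this.2
    omega
  · rw [if_neg hm]
    have hr0 : r = 0 := hr.resolve_right hm
    subst hr0
    by_contra hne
    have hpos : 0 < mu s (i + 1) := by omega
    have hmu_le : mu s (i + 1) ≤ i := by have := mu_le s (i + 1); omega
    have hbmu : Bord s (i + 1) (mu s (i + 1)) := mu_bord s (i + 1)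
    obtain ⟨u, hu⟩ : ∃ u, mu s (i + 1) = u + 1 := ⟨mu s (i + 1) - 1, by omega⟩
    rw [hu] at hbmu
    have h2 := (bord_succ s i u (by omega)).1 hbmu
    by_cases hu0 : u = 0
    · subst hu0; exact hm h2.2
    · exact hg.2.2 u (by omega) (by omega) h2.1 h2.2

theorem set_getD_self {l : List Nat} {i : Nat} {a : Nat} (h : i < l.length) :
    (l.set i a).getD i 0 = a := by
  simp [List.getD_eq_getElem?_getD, List.getElem?_set_self h]

theorem set_getD_ne {l : List Nat} {i j : Nat} {a : Nat} (h : i ≠ j) :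
    (l.set i a).getD j 0 = l.getD j 0 := by
  simp [List.getD_eq_getElem?_getD, List.getElem?_set_ne h]

theorem fold_inv (s : List Int) (n : Nat) (hn : n = s.length) (hn1 : 1 ≤ n) :
    ∀ m, m ≤ n - 1 →
      ((List.range' 1 m).foldl (kmpStep s) (List.replicate n 0, 0)).1.length = n ∧
      ((List.range' 1 m).foldl (kmpStep s) (List.replicate n 0, 0)).2 = mu s (m + 1) ∧
      (∀ j, j ≤ m →
        ((List.range' 1 m).foldl (kmpStep s) (List.replicate n 0, 0)).1.getD j 0 = mu s (j + 1)) := by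
  intro m
  induction m with
  | zero =>
    intro _
    refine ⟨by simp, ?_, ?_⟩
    · simp [mu, Nat.findGreatest]
    · intro j hj
      have hj0 : j = 0 := by omega
      subst hj0
      simp [mu, Nat.findGreatest]
  | succ m ih =>
    intro hm
    obtain ⟨hlen, hk, hfj⟩ := ih (by omega)
    have hconcat : List.range' 1 (m + 1) = List.range' 1 m ++ [1 + m] := by
      simpa using List.range'_concat (step := 1) (s := 1) (n := m)
    rw [hconcat, List.foldl_append]
    set st := (List.range' 1 m).foldl (kmpStep s) (List.replicate n 0, 0) with hst
    simp only [List.foldl_cons, List.foldl_nil]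
    have hi : (1 + m) = m + 1 := by omega
    rw [hi]
    -- apply the step lemma at i = m + 1
    have hfok : ∀ j, j < m + 1 → st.1.getD j 0 = mu s (j + 1) := fun j hj => hfj j (by omega)
    have hg0 : GoodK s (m + 1) (mu s (m + 1)) := by
      refine ⟨mu_bord s (m + 1), by have := mu_le s (m + 1); omega, ?_⟩
      intro u hu1 hu2 hbu
      have := mu_max s (m + 1) u (by omega) hbu
      omega
    have hinner := inner_spec s st.1 (m + 1) hfok (mu s (m + 1)) (mu s (m + 1)) le_rfl hg0
    rw [← hk] at hinner
    set r := kmpInner s st.1 (s.getD (m + 1) 0) st.2 st.2 with hr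
    have hmu2 := step_mu s (m + 1) r hinner.1 hinner.2
    show (kmpStep s st (m + 1)).1.length = n ∧ _ ∧ _
    unfold kmpStep
    simp only [← hr]
    refine ⟨by simpa using hlen, by simpa using hmu2, ?_⟩
    intro j hj
    by_cases hje : m + 1 = j
    · subst hje
      rw [set_getD_self (by omega)]
      exact hmu2
    · rw [set_getD_ne hje]
      exact hfj j (by omega)

-- slice comparison in B ↔ pointwise border condition
theorem slice_iff_bord (s : List Int) (p : Nat) (hp1 : 1 ≤ p) (hp2 : p ≤ s.length) :
    (s.drop p = s.take (s.length - p)) ↔ Bord s s.length (s.length - p) := by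
  constructor
  · intro h j hj
    have hlen : j < (s.drop p).length := by simp; omega
    have := congrArg (fun l => l.getD j 0) h
    simp only [] at this
    rw [List.getD_eq_getElem _ _ hlen, List.getElem_drop] at this
    have hlen2 : j < (s.take (s.length - p)).length := by simp; omega
    rw [List.getD_eq_getElem _ _ hlen2, List.getElem_take] at this
    have e : s.length - (s.length - p) + j = p + j := by omega
    rw [e, List.getD_eq_getElem _ _ (by omega), List.getD_eq_getElem _ _ (by omega)]
    exact this.symm
  · intro hb
    apply List.ext_getElem
    · simp only [List.length_drop, List.length_take]; omega
    · intro j h1 h2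
      have hj : j < s.length - p := by simpa using h2
      have := hb j hj
      have e : s.length - (s.length - p) + j = p + j := by omega
      rw [e, List.getD_eq_getElem _ _ (by omega), List.getD_eq_getElem _ _ (by omega)] at this
      rw [List.getElem_drop, List.getElem_take]
      exact this.symm

theorem find?_range'_eq_some {pred : Nat → Bool} :
    ∀ (len a p : Nat), a ≤ p → p < a + len → pred p = true →
      (∀ q, a ≤ q → q < p → pred q = false) →
      (List.range' a len).find? pred = some p := by
  intro len
  induction len with
  | zero => intro a p h1 h2; omega
  | succ len ih =>
    intro a p h1 h2 hp hprev
    rw [List.range'_succ, List.find?_cons]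
    by_cases he : p = a
    · subst he; rw [hp]
    · have : pred a = false := hprev a le_rfl (by omega)
      rw [this]
      exact ih (a + 1) p (by omega) (by omega) hp (fun q hq1 hq2 => hprev q (by omega) hq2)

-- ===== VERDICT (by name: the statement is the Claim_ definition above) =====
theorem kmp_min_period_py_spec : Claim_equal_kmp_min_period_py := by
  unfold Claim_equal_kmp_min_period_py
  intro s _
  unfold Spec_kmp_min_period_py kmp_min_period_py kmp_min_period_py_alt
  by_cases hn0 : s.length = 0
  · simp [hn0]
  · have hn1 : 1 ≤ s.length := by omega
    rw [if_neg hn0]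
    obtain ⟨hlen, hk, hfj⟩ := fold_inv s s.length rfl hn1 (s.length - 1) le_rfl
    have hfn : ((List.range' 1 (s.length - 1)).foldl (kmpStep s)
        (List.replicate s.length 0, 0)).1.getD (s.length - 1) 0 = mu s s.length := by
      rw [hfj (s.length - 1) le_rfl, show s.length - 1 + 1 = s.length from by omega]
    rw [hfn]
    have hmu_le : mu s s.length ≤ s.length - 1 := mu_le s s.length
    by_cases hmu0 : mu s s.length = 0
    · -- no nonempty border: A's period = n fails 'period < n'; B's search finds nothing
      have hnone : (List.range' 1 (s.length - 1)).find?
          (fun p => s.drop p == s.take (s.length - p)) = none := by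
        rw [List.find?_eq_none]
        intro p hp
        rw [List.mem_range'_1] at hp
        simp only [beq_iff_eq]
        intro hcontra
        have hb := (slice_iff_bord s p (by omega) (by omega)).1 hcontra
        have := mu_max s s.length (s.length - p) (by omega) hb
        omega
      rw [hnone, hmu0]
      simp
    · -- minimal period p* = n - mu; B's search finds exactly p*
      have hpos : 0 < mu s s.length := by omega
      set pstar := s.length - mu s s.length with hpstar
      have hsome : (List.range' 1 (s.length - 1)).find?
          (fun p => s.drop p == s.take (s.length - p)) = some pstar := by
        apply find?_range'_eq_some (s.length - 1) 1 pstar (by omega) (by omega)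
        · simp only [beq_iff_eq]
          apply (slice_iff_bord s pstar (by omega) (by omega)).2
          rw [show s.length - pstar = mu s s.length from by omega]
          exact mu_bord s s.length
        · intro q hq1 hq2
          rw [beq_eq_false_iff_ne]
          intro hcontra
          have hb := (slice_iff_bord s q (by omega) (by omega)).1 hcontra
          have := mu_max s s.length (s.length - q) (by omega) hb
          omega
      rw [hsome]
      have hplt : pstar < s.length := by omega
      show (if s.length % pstar = 0 ∧ pstar < s.length then some (pstar : Int) else none)
          = (if s.length % pstar = 0 then some (pstar : Int) else none)
      by_cases hmod : s.length % pstar = 0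
      · rw [if_pos ⟨hmod, hplt⟩, if_pos hmod]
      · rw [if_neg (by intro h; exact hmod h.1), if_neg hmod]
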